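-- pv_equiv track=rewrite | github.com/rdettori/qe_tools | qe_pw_to_poscar.py | build_species_counts
-- ===== SOURCE A (Python) =====
-- from typing import List, Optional, Tuple
--
-- def build_species_counts(symbols: List[str]) -> Tuple[List[str], List[int]]:
--     order: List[str] = []
--     counts: List[int] = []
--     for sym in symbols:
--         if sym not in order:
--             order.append(sym)
--             counts.append(1)
--         else:
--             idx = order.index(sym)
--             counts[idx] += 1
--     return order, counts
-- ===== SOURCE B (Python) =====
-- from typing import List, Tuple
--
-- def build_species_counts(symbols: List[str]) -> Tuple[List[str], List[int]]:
--     order = list(dict.fromkeys(symbols))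
--     counts = [symbols.count(s) for s in order]
--     return order, counts
-- ===== Notes on version B (the rewrite author's own statement) =====
-- stated objective: simpler
-- what changed: Replaced A's single incremental pass (membership branch plus in-place index increment) with a two-phase dedupe-then-count: build the first-occurrence order via dict.fromkeys, then tally each symbol with list.count in a separate pass.
import Mathlib
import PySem

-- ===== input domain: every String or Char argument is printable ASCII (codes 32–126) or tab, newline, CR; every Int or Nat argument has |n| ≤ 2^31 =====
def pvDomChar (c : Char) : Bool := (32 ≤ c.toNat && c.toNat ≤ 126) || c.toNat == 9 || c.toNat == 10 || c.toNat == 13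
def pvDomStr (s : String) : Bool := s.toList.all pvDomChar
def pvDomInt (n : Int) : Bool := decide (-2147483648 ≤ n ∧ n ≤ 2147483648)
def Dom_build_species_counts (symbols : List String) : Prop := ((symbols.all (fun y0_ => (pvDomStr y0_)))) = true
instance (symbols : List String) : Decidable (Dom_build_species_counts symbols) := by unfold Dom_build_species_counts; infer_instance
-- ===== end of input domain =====

-- B replaces A's single incremental pass (membership branch + in-place counter increment)
-- with a two-phase dedupe-then-count decomposition; objective: simpler.

-- ===== PORT A =====
-- one loop iteration of A: membership test, then append-or-increment
def bscStep (st : List String × List Int) (sym : String) : List String × List Int :=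
  if sym ∉ st.1 then (st.1 ++ [sym], st.2 ++ [1])
  else
    match PySem.List.index? st.1 sym with   -- order.index(sym); sym ∈ order so it succeeds
    | some idx => (st.1, st.2.modify idx (· + 1))   -- counts[idx] += 1
    | none => (st.1, st.2)

def build_species_counts (symbols : List String) : List String × List Int :=
  symbols.foldl bscStep ([], [])

-- ===== PORT B =====
def build_species_counts_alt (symbols : List String) : List String × List Int :=
  let order := PySem.List.dedup symbols          -- list(dict.fromkeys(symbols))
  (order, order.map (fun s => (PySem.List.count symbols s : Int)))   -- [symbols.count(s) for s in order]

-- ===== PRECONDITION & SPEC =====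
def Spec_build_species_counts (symbols : List String) (out : List String × List Int) : Prop := out = build_species_counts_alt symbols
instance (symbols : List String) (out : List String × List Int) : Decidable (Spec_build_species_counts symbols out) := by unfold Spec_build_species_counts; infer_instance

-- ===== CLAIM (what is proved, stated in full; the proofs are below) =====
def Claim_equal_build_species_counts : Prop := ∀ (symbols : List String), Dom_build_species_counts symbols → Spec_build_species_counts symbols (build_species_counts symbols)

-- ===== LEMMAS AND PROOFS =====

-- dedup of a one-element extension
theorem dedup_append_singleton (l : List String) (x : String) :
    PySem.List.dedup (l ++ [x]) = if x ∈ PySem.List.dedup l then PySem.List.dedup l else PySem.List.dedup l ++ [x] := by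
  simp only [PySem.List.dedup_eq_ofList, PySem.Set.ofList_eq_foldl, List.foldl_append, List.foldl_cons, List.foldl_nil]
  simp [PySem.Set.add, PySem.Set.contains]

-- incrementing the unique slot of sym in a mapped-count list
theorem modify_map_nodup (l : List String) (hnd : l.Nodup) (f : String → Int) (sym : String)
    (k : Nat) (hk : PySem.List.index? l sym = some k) :
    (l.map f).modify k (· + 1) = l.map (fun s => if s = sym then f s + 1 else f s) := by
  obtain ⟨hk', hget, _⟩ := PySem.List.getElem_of_index?_eq_some hk
  apply List.ext_getElem
  · simp
  · intro i h1 h2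
    have hl : i < l.length := by simpa using h2
    simp only [List.getElem_modify, List.getElem_map]
    by_cases hik : k = i
    · subst hik; simp [hget]
    · have hne : l[i] ≠ sym := by
        intro hc
        exact hik ((List.Nodup.getElem_inj_iff hnd).mp (hget.trans hc.symm))
      simp [hik, hne]

-- loop invariant: after processing `done`, the state is (dedup done, counts-in-done)
theorem bsc_invariant (rest done : List String) :
    rest.foldl bscStep (PySem.List.dedup done, (PySem.List.dedup done).map (fun s => (PySem.List.count done s : Int)))
      = (PySem.List.dedup (done ++ rest), (PySem.List.dedup (done ++ rest)).map (fun s => (PySem.List.count (done ++ rest) s : Int))) := by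
  induction rest generalizing done with
  | nil => simp
  | cons sym rest ih =>
    have hmem : sym ∈ PySem.List.dedup done ↔ sym ∈ done := PySem.List.mem_dedup done sym
    have key : bscStep (PySem.List.dedup done, (PySem.List.dedup done).map (fun s => (PySem.List.count done s : Int))) sym
        = (PySem.List.dedup (done ++ [sym]), (PySem.List.dedup (done ++ [sym])).map (fun s => (PySem.List.count (done ++ [sym]) s : Int))) := by
      unfold bscStep
      by_cases h : sym ∈ done
      · -- increment branch
        rw [if_neg (by simp [h])]
        have hidx : (PySem.List.index? (PySem.List.dedup done) sym).isSome := by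
          rw [PySem.List.index?_isSome_iff]; exact hmem.mpr h
        obtain ⟨k, hk⟩ := Option.isSome_iff_exists.mp hidx
        rw [hk]
        dsimp only
        have hded : PySem.List.dedup (done ++ [sym]) = PySem.List.dedup done := by
          rw [dedup_append_singleton, if_pos (hmem.mpr h)]
        rw [hded, modify_map_nodup _ (PySem.List.nodup_dedup done) _ _ _ hk]
        refine Prod.ext rfl ?_
        apply List.map_congr_left
        intro s _
        simp only [PySem.List.count_eq, List.count_append, List.count_singleton]
        by_cases hs : s = sym
        · subst hs; simp
        · simp [hs, Ne.symm hs]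
      · -- append branch
        rw [if_pos (by simp [h])]
        have hded : PySem.List.dedup (done ++ [sym]) = PySem.List.dedup done ++ [sym] := by
          rw [dedup_append_singleton, if_neg (fun hc => h (hmem.mp hc))]
        rw [hded]
        refine Prod.ext rfl ?_
        simp only [List.map_append, List.map_cons, List.map_nil]
        congr 1
        · apply List.map_congr_left
          intro s hsmem
          have hs : s ≠ sym := fun hc => h (hc ▸ (PySem.List.mem_dedup done s).mp hsmem)
          simp only [PySem.List.count_eq, List.count_append, List.count_singleton]
          simp [Ne.symm hs]
        · have : sym ∉ done := h
          simp [PySem.List.count_eq, List.count_append, List.count_eq_zero.mpr this]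
    rw [List.foldl_cons, key]
    have := ih (done ++ [sym])
    simpa using this
-- ===== VERDICT (by name: the statement is the Claim_ definition above) =====
theorem build_species_counts_spec : Claim_equal_build_species_counts := by
  intro symbols _
  unfold Spec_build_species_counts build_species_counts build_species_counts_alt
  have := bsc_invariant symbols []
  simpa [PySem.List.dedup] using this
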